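-- pv_equiv track=rewrite | github.com/leynos/cuprum | tests/helpers/parity.py | chunk_sizes_from_cut_points
-- ===== SOURCE A (Python) =====
-- def chunk_sizes_from_cut_points(
--     payload_size: int,
--     cut_points: tuple[int, ...],
-- ) -> tuple[int, ...]:
--     """Convert sorted cut points into sequential chunk sizes.
--
--     Parameters
--     ----------
--     payload_size : int
--         Total payload length in bytes.
--     cut_points : tuple[int, ...]
--         Strictly increasing byte offsets that split the payload.
--
--     Returns
--     -------
--     tuple[int, ...]
--         A tuple of positive chunk sizes that sums to ``payload_size``.
--     """
--     if payload_size < 0: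
--         msg = f"payload_size must be non-negative, got {payload_size}"
--         raise ValueError(msg)
--
--     if not cut_points:
--         return (payload_size,) if payload_size > 0 else ()
--
--     previous = 0
--     sizes: list[int] = []
--     for cut in cut_points:
--         if cut <= previous or cut >= payload_size:
--             msg = (
--                 "cut points must be strictly increasing and inside the payload, "
--                 f"got {cut_points!r} for payload_size={payload_size}"
--             )
--             raise ValueError(msg)
--         sizes.append(cut - previous)
--         previous = cut
--
--     sizes.append(payload_size - previous)
--     return tuple(sizes)
-- ===== SOURCE B (Python) =====
-- def chunk_sizes_from_cut_points(payload_size, cut_points):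
--     if payload_size < 0:
--         msg = f"payload_size must be non-negative, got {payload_size}"
--         raise ValueError(msg)
--
--     if not cut_points:
--         return (payload_size,) if payload_size > 0 else ()
--
--     msg = (
--         "cut points must be strictly increasing and inside the payload, "
--         f"got {cut_points!r} for payload_size={payload_size}"
--     )
--
--     def between(cuts, lo, hi):
--         # chunk sizes of the sub-payload spanning offsets (lo, hi) split by cuts
--         if not cuts:
--             if lo >= hi:
--                 raise ValueError(msg)
--             return (hi - lo,)
--         k = len(cuts) // 2
--         m = cuts[k]
--         if m <= lo or m >= hi:
--             raise ValueError(msg)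
--         return between(cuts[:k], lo, m) + between(cuts[k + 1:], m, hi)
--
--     return between(tuple(cut_points), 0, payload_size)
-- ===== Notes on version B (the rewrite author's own statement) =====
-- stated objective: alternative
-- what changed: Replaces the running-previous accumulator loop with a divide-and-conquer: the middle cut becomes a pivot boundary validated against its (lo, hi) interval and the two halves of the cut list are solved recursively and concatenated.
import Mathlib
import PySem

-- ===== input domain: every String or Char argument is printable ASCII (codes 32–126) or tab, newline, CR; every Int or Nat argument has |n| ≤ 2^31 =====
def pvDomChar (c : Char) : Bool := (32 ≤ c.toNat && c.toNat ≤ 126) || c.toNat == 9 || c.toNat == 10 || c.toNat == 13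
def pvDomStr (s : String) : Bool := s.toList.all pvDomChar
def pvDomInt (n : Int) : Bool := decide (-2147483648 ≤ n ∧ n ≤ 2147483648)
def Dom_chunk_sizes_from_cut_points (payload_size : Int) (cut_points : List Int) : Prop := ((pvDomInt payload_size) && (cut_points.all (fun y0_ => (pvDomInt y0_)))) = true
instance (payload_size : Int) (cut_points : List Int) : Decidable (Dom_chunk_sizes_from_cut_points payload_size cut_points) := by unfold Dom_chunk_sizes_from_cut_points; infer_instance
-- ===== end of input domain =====

-- B replaces A's running-previous accumulator loop with a divide-and-conquer on the cut
-- list: the middle cut is a pivot boundary validated against its interval, halves recurse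
-- (objective: alternative).


-- ===== PORT A =====
-- A's loop, step for step: state (previous, sizes); 'none' marks the raise of ValueError
-- (excluded by Pre_ below).
def chunkStepA (payload_size : Int) (acc : Option (Int × List Int)) (cut : Int) :
    Option (Int × List Int) :=
  match acc with
  | none => none
  | some (previous, sizes) =>
      if cut ≤ previous ∨ cut ≥ payload_size then none
      else some (cut, sizes ++ [cut - previous])

def chunk_sizes_from_cut_points (payload_size : Int) (cut_points : List Int) : List Int :=
  if payload_size < 0 then []          -- raise ValueError (outside Pre_)
  else if cut_points = [] then (if payload_size > 0 then [payload_size] else [])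
  else
    match cut_points.foldl (chunkStepA payload_size) (some (0, [])) with
    | none => []                        -- raise ValueError (outside Pre_)
    | some (previous, sizes) => sizes ++ [payload_size - previous]

-- ===== PORT B =====
-- Source B's 'between': divide and conquer; the middle cut m is the pivot boundary of (lo, hi);
-- 'none' marks the raise of ValueError (excluded by Pre_ below).
def chunkBetween (cuts : List Int) (lo hi : Int) : Option (List Int) :=
  if hne : cuts = [] then (if lo ≥ hi then none else some [hi - lo])
  else
    let k := cuts.length / 2
    match cuts[k]? with
    | none => none                      -- unreachable: k < cuts.length
    | some m =>
        if m ≤ lo ∨ m ≥ hi then none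
        else
          match chunkBetween (cuts.take k) lo m, chunkBetween (cuts.drop (k + 1)) m hi with
          | some l, some r => some (l ++ r)
          | _, _ => none
termination_by cuts.length
decreasing_by
  all_goals
    have hpos : 0 < cuts.length := List.length_pos_of_ne_nil hne
    simp [List.length_take, List.length_drop]
    omega

def chunk_sizes_from_cut_points_alt (payload_size : Int) (cut_points : List Int) : List Int :=
  if payload_size < 0 then []          -- raise ValueError (outside Pre_)
  else if cut_points = [] then (if payload_size > 0 then [payload_size] else [])
  else
    match chunkBetween cut_points 0 payload_size with
    | none => []                        -- raise ValueError (outside Pre_)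
    | some sizes => sizes

-- ===== PRECONDITION & SPEC =====
-- Pre_ excludes exactly the inputs on which A raises ValueError: a negative payload_size,
-- or cut points that are not 0 < c1 < … < ck < payload_size.
def Pre_chunk_sizes_from_cut_points (payload_size : Int) (cut_points : List Int) : Prop :=
  0 ≤ payload_size ∧
    (cut_points = [] ∨ List.Pairwise (· < ·) (0 :: cut_points ++ [payload_size]))
instance (payload_size : Int) (cut_points : List Int) : Decidable (Pre_chunk_sizes_from_cut_points payload_size cut_points) := by unfold Pre_chunk_sizes_from_cut_points; infer_instance

def pvWitness_chunk_sizes_from_cut_points : Int × List Int := (10, [3, 7])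

def Spec_chunk_sizes_from_cut_points (payload_size : Int) (cut_points : List Int) (out : List Int) : Prop := out = chunk_sizes_from_cut_points_alt payload_size cut_points
instance (payload_size : Int) (cut_points : List Int) (out : List Int) : Decidable (Spec_chunk_sizes_from_cut_points payload_size cut_points out) := by unfold Spec_chunk_sizes_from_cut_points; infer_instance

-- ===== CLAIM =====
def Claim_equal_chunk_sizes_from_cut_points : Prop := ∀ (payload_size : Int) (cut_points : List Int), Dom_chunk_sizes_from_cut_points payload_size cut_points → Pre_chunk_sizes_from_cut_points payload_size cut_points → Spec_chunk_sizes_from_cut_points payload_size cut_points (chunk_sizes_from_cut_points payload_size cut_points)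

-- ===== LEMMAS AND PROOFS =====

-- pairwise differences of adjacent elements
def pvDiffs (l : List Int) : List Int := (l.zip l.tail).map (fun ab => ab.2 - ab.1)

theorem pvDiffs_append (l1 : List Int) (m : Int) (l2 : List Int) (h : l1 ≠ []) :
    pvDiffs (l1 ++ m :: l2) = pvDiffs (l1 ++ [m]) ++ pvDiffs (m :: l2) := by
  induction l1 with
  | nil => simp at h
  | cons x rest ih =>
      cases rest with
      | nil => simp [pvDiffs]
      | cons y rs =>
          have := ih (by simp)
          simp only [List.cons_append, pvDiffs, List.tail, List.zip_cons_cons,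
            List.map_cons] at this ⊢
          simp_all

-- A's fold from state (prev, sizes) produces sizes ++ pairwise diffs,
-- provided the remaining boundaries are strictly increasing.
theorem chunkA_fold (p : Int) (cps : List Int) :
    ∀ (prev : Int) (sizes : List Int),
      List.Pairwise (· < ·) (prev :: cps ++ [p]) →
      (match cps.foldl (chunkStepA p) (some (prev, sizes)) with
       | none => ([] : List Int)
       | some (pr, sz) => sz ++ [p - pr])
      = sizes ++ pvDiffs (prev :: cps ++ [p]) := by
  induction cps with
  | nil =>
      intro prev sizes _
      simp [pvDiffs, List.zip]
  | cons c rest ih =>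
      intro prev sizes h
      have h1 : prev < c := by
        have := List.pairwise_cons.1 h
        exact this.1 c (by simp)
      have htail : List.Pairwise (· < ·) (c :: rest ++ [p]) := by
        have := List.pairwise_cons.1 h
        simpa using this.2
      have hcp : c < p := by
        have := List.pairwise_cons.1 htail
        exact this.1 p (by simp)
      have hstep : chunkStepA p (some (prev, sizes)) c
          = some (c, sizes ++ [c - prev]) := by
        simp [chunkStepA]
        omega
      calc (match ((c :: rest).foldl (chunkStepA p) (some (prev, sizes))) with
             | none => ([] : List Int)
             | some (pr, sz) => sz ++ [p - pr])
          = (match (rest.foldl (chunkStepA p) (some (c, sizes ++ [c - prev]))) with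
             | none => ([] : List Int)
             | some (pr, sz) => sz ++ [p - pr]) := by
              simp [List.foldl, hstep]
        _ = (sizes ++ [c - prev]) ++ pvDiffs (c :: rest ++ [p]) := ih c (sizes ++ [c - prev]) htail
        _ = sizes ++ pvDiffs (prev :: (c :: rest) ++ [p]) := by
              simp [pvDiffs, List.zip_cons_cons]

-- B's divide and conquer produces the pairwise diffs under strict increase.
theorem chunkB_between (n : ℕ) :
    ∀ (cuts : List Int), cuts.length = n → ∀ (lo hi : Int),
      List.Pairwise (· < ·) (lo :: cuts ++ [hi]) →
      chunkBetween cuts lo hi = some (pvDiffs (lo :: cuts ++ [hi])) := by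
  induction n using Nat.strong_induction_on with
  | _ n ih =>
    intro cuts hlen lo hi h
    by_cases hne : cuts = []
    · subst hne
      have hlt : lo < hi := (List.pairwise_cons.1 h).1 hi (by simp)
      simp [chunkBetween, pvDiffs, not_le.2 hlt]
    · have hpos : 0 < cuts.length := List.length_pos_of_ne_nil hne
      have hklt : cuts.length / 2 < cuts.length := Nat.div_lt_self hpos one_lt_two
      have hm : cuts[cuts.length / 2]? = some cuts[cuts.length / 2] :=
        List.getElem?_eq_getElem hklt
      set m := cuts[cuts.length / 2] with hmdef
      set L := cuts.take (cuts.length / 2) with hLdef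
      set R := cuts.drop (cuts.length / 2 + 1) with hRdef
      have hsplit : cuts = L ++ m :: R := by
        rw [hLdef, hRdef, hmdef, ← List.drop_eq_getElem_cons hklt, List.take_append_drop]
      have hLlt : L.length < n := by
        rw [← hlen, hLdef]; simp [List.length_take]; omega
      have hRlt : R.length < n := by
        rw [← hlen, hRdef]; simp [List.length_drop]; omega
      have hfull : List.Pairwise (· < ·) ((lo :: L) ++ m :: (R ++ [hi])) := by
        have heq : lo :: cuts ++ [hi] = (lo :: L) ++ m :: (R ++ [hi]) := by
          rw [hsplit]; simp
        rwa [heq] at h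
      have hleft : List.Pairwise (· < ·) (lo :: L ++ [m]) :=
        hfull.sublist
          (List.Sublist.append (List.Sublist.refl (lo :: L))
            (List.singleton_sublist.2 (by simp)))
      have hright : List.Pairwise (· < ·) (m :: R ++ [hi]) :=
        hfull.sublist (List.sublist_append_right (lo :: L) (m :: (R ++ [hi])))
      have hlom : lo < m :=
        (List.pairwise_append.1 hfull).2.2 lo (by simp) m (by simp)
      have hmhi : m < hi := (List.pairwise_cons.1 hright).1 hi (by simp)
      have hL := ih L.length hLlt L rfl lo m hleft
      have hR := ih R.length hRlt R rfl m hi hright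
      rw [chunkBetween, dif_neg hne]
      simp only [← hLdef, ← hRdef, hm]
      rw [if_neg (by omega), hL, hR]
      have hdiff : pvDiffs (lo :: cuts ++ [hi])
          = pvDiffs (lo :: L ++ [m]) ++ pvDiffs (m :: R ++ [hi]) := by
        rw [hsplit]
        have := pvDiffs_append (lo :: L) m (R ++ [hi]) (by simp)
        simpa using this
      rw [hdiff]

-- ===== VERDICT =====
theorem chunk_sizes_from_cut_points_spec : Claim_equal_chunk_sizes_from_cut_points := by
  intro p cps _ hpre
  obtain ⟨hp, hc⟩ := hpre
  unfold Spec_chunk_sizes_from_cut_points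
  unfold chunk_sizes_from_cut_points chunk_sizes_from_cut_points_alt
  have hnp : ¬ p < 0 := not_lt.2 hp
  rcases hc with hnil | hpair
  · simp [hnil, hnp]
  · by_cases hcps : cps = []
    · simp [hcps, hnp]
    · simp only [hnp, if_false, hcps]
      rw [chunkA_fold p cps 0 [] hpair, chunkB_between cps.length cps rfl 0 p hpair]
      simp
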